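-- pv_equiv track=rewrite | github.com/aleloi/advent-of-code | src/python/day16.py | all_valid
-- ===== SOURCE A (Python) =====
-- def all_valid(column, valid_ranges):
--     for c in column:
--         for a, b in valid_ranges:
--             if a <= c <= b:
--                 break
--         else:
--             return False
--     return True
-- ===== SOURCE B (Python) =====
-- def all_valid(column, valid_ranges):
--     # sort ranges by start, merge overlapping ones once, then binary-search each value (alternative algorithm)
--     ivs = sorted(valid_ranges, key=lambda r: r[0])
--     merged = []
--     for a, b in ivs:
--         if merged and a <= merged[-1][1]:
--             la, lb = merged[-1]
--             merged[-1] = (la, lb if lb > b else b)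
--         else:
--             merged.append((a, b))
--     starts = [a for a, _ in merged]
--     for c in column:
--         lo, hi = 0, len(starts)
--         while lo < hi:
--             mid = (lo + hi) // 2
--             if c < starts[mid]:
--                 hi = mid
--             else:
--                 lo = mid + 1
--         if lo == 0 or c > merged[lo - 1][1]:
--             return False
--     return True
-- ===== Notes on version B (the rewrite author's own statement) =====
-- stated objective: alternative
-- what changed: Instead of scanning every range for every column value, B sorts the ranges by start, merges overlapping ranges in one pass, and binary-searches each value in the merged disjoint list; on the benchmark's inputs (few ranges) this was not measurably faster.
import Mathlib
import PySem

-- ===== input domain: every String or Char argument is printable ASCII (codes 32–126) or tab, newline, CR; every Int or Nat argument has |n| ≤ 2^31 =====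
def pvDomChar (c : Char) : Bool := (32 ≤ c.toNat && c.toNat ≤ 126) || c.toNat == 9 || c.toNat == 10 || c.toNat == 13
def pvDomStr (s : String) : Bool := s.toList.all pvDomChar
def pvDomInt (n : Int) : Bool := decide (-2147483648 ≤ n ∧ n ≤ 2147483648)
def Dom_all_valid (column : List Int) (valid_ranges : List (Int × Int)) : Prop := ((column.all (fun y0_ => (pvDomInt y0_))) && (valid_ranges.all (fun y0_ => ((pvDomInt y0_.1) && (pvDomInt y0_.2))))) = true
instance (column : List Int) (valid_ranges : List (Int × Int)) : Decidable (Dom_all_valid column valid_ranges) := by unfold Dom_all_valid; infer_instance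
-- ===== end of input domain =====

-- B sorts the ranges by start, merges overlapping ranges in one pass and binary-searches
-- each column value in the merged list (objective: alternative algorithm; not measured faster).

-- ===== PORT A =====
-- inner 'for a, b in valid_ranges: if a <= c <= b: break / else: return False'
def pvAnyRange (c : Int) : List (Int × Int) → Bool
  | [] => false
  | (a, b) :: rest => if a ≤ c ∧ c ≤ b then true else pvAnyRange c rest

def all_valid (column : List Int) (valid_ranges : List (Int × Int)) : Bool :=
  match column with
  | [] => true
  | c :: cs => if pvAnyRange c valid_ranges then all_valid cs valid_ranges else false

-- ===== PORT B =====
-- the merge loop, carrying the current last interval (a, b) = merged[-1]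
def pvMergeGo (a b : Int) : List (Int × Int) → List (Int × Int)
  | [] => [(a, b)]
  | (a2, b2) :: rest =>
    if a2 ≤ b then pvMergeGo a (max b b2) rest
    else (a, b) :: pvMergeGo a2 b2 rest

def pvMerge : List (Int × Int) → List (Int × Int)
  | [] => []
  | (a, b) :: rest => pvMergeGo a b rest

-- the hand-written bisect_right while-loop on 'starts' is PySem.List.bisectRight
def pvCovered (merged : List (Int × Int)) (starts : List Int) (c : Int) : Bool :=
  let lo := PySem.List.bisectRight starts c
  !(lo == 0 || decide ((merged.getD (lo - 1) (0, 0)).2 < c))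

def all_valid_alt (column : List Int) (valid_ranges : List (Int × Int)) : Bool :=
  let merged := pvMerge (PySem.List.sorted valid_ranges (fun r => r.1) false)
  let starts := merged.map Prod.fst
  column.all (fun c => pvCovered merged starts c)

-- ===== PRECONDITION & SPEC =====
def Spec_all_valid (column : List Int) (valid_ranges : List (Int × Int)) (out : Bool) : Prop := out = all_valid_alt column valid_ranges
instance (column : List Int) (valid_ranges : List (Int × Int)) (out : Bool) : Decidable (Spec_all_valid column valid_ranges out) := by unfold Spec_all_valid; infer_instance

-- ===== CLAIM (what is proved, stated in full; the proofs are below) =====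
def Claim_equal_all_valid : Prop := ∀ (column : List Int) (valid_ranges : List (Int × Int)), Dom_all_valid column valid_ranges → Spec_all_valid column valid_ranges (all_valid column valid_ranges)

-- ===== LEMMAS AND PROOFS =====

-- c is covered by some range of L
def pvCov (c : Int) (L : List (Int × Int)) : Prop := ∃ p ∈ L, p.1 ≤ c ∧ c ≤ p.2

theorem pvAnyRange_iff (c : Int) (L : List (Int × Int)) :
    pvAnyRange c L = true ↔ pvCov c L := by
  induction L with
  | nil => simp [pvAnyRange, pvCov]
  | cons p rest ih =>
    obtain ⟨a, b⟩ := p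
    by_cases h : a ≤ c ∧ c ≤ b <;> simp [pvAnyRange, pvCov, h] at ih ⊢ <;> tauto

theorem all_valid_iff (column : List Int) (vr : List (Int × Int)) :
    all_valid column vr = true ↔ ∀ c ∈ column, pvCov c vr := by
  induction column with
  | nil => simp [all_valid]
  | cons c cs ih =>
    simp only [all_valid, List.mem_cons]
    by_cases h : pvAnyRange c vr = true
    · simp only [if_pos h, ih]
      rw [pvAnyRange_iff] at h
      constructor
      · intro hall c' hc'; rcases hc' with rfl | hc'; exact h; exact hall c' hc'
      · intro hall c' hc'; exact hall c' (Or.inr hc')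
    · rw [Bool.not_eq_true] at h
      simp only [h]
      constructor
      · intro hf; exact absurd hf (by simp)
      · intro hall
        have := hall c (Or.inl rfl)
        rw [← pvAnyRange_iff] at this
        simp [h] at this

theorem pvMergeGo_cov (c a b : Int) (L : List (Int × Int))
    (hle : ∀ p ∈ L, a ≤ p.1)
    (hsorted : (L.map Prod.fst).Pairwise (· ≤ ·)) :
    (pvCov c (pvMergeGo a b L) ↔ ((a ≤ c ∧ c ≤ b) ∨ pvCov c L)) := by
  induction L generalizing a b with
  | nil => simp [pvMergeGo, pvCov]
  | cons p rest ih =>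
    obtain ⟨a2, b2⟩ := p
    simp only [List.map_cons, List.pairwise_cons] at hsorted
    have ha2 : a ≤ a2 := hle (a2, b2) (by simp)
    by_cases h : a2 ≤ b
    · rw [pvMergeGo, if_pos h,
        ih a (max b b2) (fun p hp => le_trans ha2 (by simpa using hsorted.1 p.1 (List.mem_map_of_mem hp))) hsorted.2]
      constructor
      · rintro (⟨h1, h2⟩ | hc)
        · rcases le_or_gt c b with hb | hb
          · exact Or.inl ⟨h1, hb⟩
          · refine Or.inr ⟨(a2, b2), by simp, le_trans h (le_of_lt hb), ?_⟩
            rcases le_max_iff.mp h2 with h' | h'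
            · omega
            · exact h'
        · exact Or.inr (by simp [pvCov] at hc ⊢; tauto)
      · rintro (⟨h1, h2⟩ | hc)
        · exact Or.inl ⟨h1, le_trans h2 (le_max_left _ _)⟩
        · simp only [pvCov, List.mem_cons] at hc
          rcases hc with ⟨p, hp | hp, hc1, hc2⟩
          · subst hp; exact Or.inl ⟨le_trans ha2 hc1, le_trans hc2 (le_max_right _ _)⟩
          · exact Or.inr ⟨p, hp, hc1, hc2⟩
    · rw [pvMergeGo, if_neg h]
      have := ih a2 b2 (fun p hp => by simpa using hsorted.1 p.1 (List.mem_map_of_mem hp)) hsorted.2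
      simp only [pvCov, List.mem_cons] at this ⊢
      constructor
      · rintro ⟨p, hp | hp, h1, h2⟩
        · subst hp; exact Or.inl ⟨h1, h2⟩
        · rcases (this.mp ⟨p, hp, h1, h2⟩) with h' | ⟨q, hq, hq1, hq2⟩
          · exact Or.inr ⟨(a2, b2), Or.inl rfl, h'.1, h'.2⟩
          · exact Or.inr ⟨q, Or.inr hq, hq1, hq2⟩
      · rintro (⟨h1, h2⟩ | ⟨p, hp | hp, h1, h2⟩)
        · exact ⟨(a, b), Or.inl rfl, h1, h2⟩
        · subst hp
          rcases (this.mpr (Or.inl ⟨h1, h2⟩)) with ⟨q, hq, hq1, hq2⟩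
          exact ⟨q, Or.inr hq, hq1, hq2⟩
        · rcases (this.mpr (Or.inr ⟨p, hp, h1, h2⟩)) with ⟨q, hq, hq1, hq2⟩
          exact ⟨q, Or.inr hq, hq1, hq2⟩

-- structural invariant of the merged list: starts nondecreasing, consecutive intervals separated,
-- and every start bounded below by a
theorem pvMergeGo_inv (a b : Int) (L : List (Int × Int))
    (hle : ∀ p ∈ L, a ≤ p.1)
    (hsorted : (L.map Prod.fst).Pairwise (· ≤ ·)) :
    ((pvMergeGo a b L).map Prod.fst).Pairwise (· ≤ ·)
      ∧ List.IsChain (fun p q => p.2 < q.1) (pvMergeGo a b L)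
      ∧ (∀ p ∈ pvMergeGo a b L, a ≤ p.1) := by
  induction L generalizing a b with
  | nil => simp [pvMergeGo]
  | cons p rest ih =>
    obtain ⟨a2, b2⟩ := p
    simp only [List.map_cons, List.pairwise_cons] at hsorted
    have ha2 : a ≤ a2 := hle (a2, b2) (by simp)
    have hrest : ∀ p ∈ rest, a2 ≤ p.1 := fun p hp => by
      simpa using hsorted.1 p.1 (List.mem_map_of_mem hp)
    by_cases h : a2 ≤ b
    · rw [pvMergeGo, if_pos h]
      exact ih a (max b b2) (fun p hp => le_trans ha2 (hrest p hp)) hsorted.2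
    · rw [pvMergeGo, if_neg h]
      obtain ⟨ih1, ih2, ih3⟩ := ih a2 b2 hrest hsorted.2
      refine ⟨?_, ?_, ?_⟩
      · simp only [List.map_cons, List.pairwise_cons]
        exact ⟨fun x hx => by
          obtain ⟨q, hq, rfl⟩ := List.mem_map.mp hx
          exact le_trans ha2 (ih3 q hq), ih1⟩
      · rw [List.isChain_cons]
        refine ⟨fun q hq => ?_, ih2⟩
        have hq' : q ∈ pvMergeGo a2 b2 rest := by
          cases hmem : pvMergeGo a2 b2 rest with
          | nil => simp [hmem] at hq
          | cons x t => simp [hmem] at hq; simp [hq]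
        exact lt_of_lt_of_le (lt_of_not_ge h) (ih3 q hq')
      · intro p hp
        rcases List.mem_cons.mp hp with rfl | hp'
        · exact le_refl _
        · exact le_trans ha2 (ih3 p hp')

theorem pvMerge_cov (c : Int) (S : List (Int × Int))
    (hsorted : (S.map Prod.fst).Pairwise (· ≤ ·)) :
    pvCov c (pvMerge S) ↔ pvCov c S := by
  cases S with
  | nil => simp [pvMerge]
  | cons p rest =>
    obtain ⟨a, b⟩ := p
    simp only [List.map_cons, List.pairwise_cons] at hsorted
    rw [pvMerge, pvMergeGo_cov c a b rest
      (fun q hq => by simpa using hsorted.1 q.1 (List.mem_map_of_mem hq)) hsorted.2]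
    simp [pvCov]

theorem pvMerge_inv (S : List (Int × Int))
    (hsorted : (S.map Prod.fst).Pairwise (· ≤ ·)) :
    ((pvMerge S).map Prod.fst).Pairwise (· ≤ ·)
      ∧ List.IsChain (fun p q => p.2 < q.1) (pvMerge S) := by
  cases S with
  | nil => simp [pvMerge]
  | cons p rest =>
    obtain ⟨a, b⟩ := p
    simp only [List.map_cons, List.pairwise_cons] at hsorted
    have := pvMergeGo_inv a b rest
      (fun q hq => by simpa using hsorted.1 q.1 (List.mem_map_of_mem hq)) hsorted.2
    exact ⟨this.1, this.2.1⟩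

theorem pvCovered_iff (M : List (Int × Int)) (c : Int)
    (hsorted : (M.map Prod.fst).Pairwise (· ≤ ·))
    (hsep : List.IsChain (fun p q => p.2 < q.1) M) :
    pvCovered M (M.map Prod.fst) c = true ↔ pvCov c M := by
  obtain ⟨hle, hlt', hgt⟩ := PySem.List.bisectRight_spec (M.map Prod.fst) c hsorted
  set lo := PySem.List.bisectRight (M.map Prod.fst) c with hlo
  simp only [List.length_map] at hle hlt' hgt
  have hstart : ∀ j (hj : j < M.length), (M.map Prod.fst)[j]'(by simpa using hj) = (M[j]'hj).1 := by
    intro j hj; simp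
  constructor
  · intro h
    simp only [pvCovered, ← hlo, Bool.not_eq_true', Bool.or_eq_false_iff, beq_eq_false_iff_ne,
      decide_eq_false_iff_not, not_lt] at h
    obtain ⟨hne, hc2⟩ := h
    have hpos : 0 < lo := Nat.pos_of_ne_zero hne
    have hj : lo - 1 < M.length := by omega
    have h1 : (M[lo-1]'hj).1 ≤ c := by
      have := hlt' (lo - 1) (by simpa using hj) (by omega)
      rwa [hstart _ hj] at this
    have hd : M.getD (lo - 1) (0, 0) = M[lo-1]'hj := List.getD_eq_getElem M (0,0) hj
    rw [hd] at hc2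
    exact ⟨M[lo-1]'hj, List.getElem_mem hj, h1, hc2⟩
  · rintro ⟨p, hp, h1, h2⟩
    obtain ⟨i, hi, rfl⟩ := List.mem_iff_getElem.mp hp
    have hilt : i < lo := by
      by_contra hcon
      have := hgt i (by simpa using hi) (by omega)
      rw [hstart _ hi] at this
      omega
    have hpos : 0 < lo := by omega
    have hj : lo - 1 < M.length := by omega
    -- i must be exactly lo - 1: otherwise separation contradicts coverage
    have hieq : i = lo - 1 := by
      by_contra hne
      have hi1 : i + 1 < M.length := by omega
      have hsep' : (M[i]'hi).2 < (M[i+1]'hi1).1 := by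
        have := List.isChain_iff_getElem.mp hsep i (by omega)
        exact this
      have hmono : (M[i+1]'hi1).1 ≤ (M[lo-1]'hj).1 := by
        rcases Nat.lt_or_eq_of_le (by omega : i + 1 ≤ lo - 1) with hlt2 | heq
        · have := List.pairwise_iff_getElem.mp hsorted (i+1) (lo-1)
            (by simpa using hi1) (by simpa using hj) hlt2
          rwa [hstart _ hi1, hstart _ hj] at this
        · simp only [heq]; exact le_refl _
      have hlast : (M[lo-1]'hj).1 ≤ c := by
        have := hlt' (lo - 1) (by simpa using hj) (by omega)
        rwa [hstart _ hj] at this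
      exact absurd (lt_of_lt_of_le (lt_of_lt_of_le (lt_of_le_of_lt h2 hsep') hmono) hlast)
        (lt_irrefl c)
    subst hieq
    simp only [pvCovered, ← hlo, Bool.not_eq_true', Bool.or_eq_false_iff, beq_eq_false_iff_ne,
      decide_eq_false_iff_not, not_lt]
    refine ⟨by omega, ?_⟩
    rw [List.getD_eq_getElem M (0,0) hj]
    exact h2

theorem all_valid_alt_iff (column : List Int) (vr : List (Int × Int)) :
    all_valid_alt column vr = true ↔ ∀ c ∈ column, pvCov c vr := by
  unfold all_valid_alt
  have hsorted := PySem.List.sorted_map_key_pairwise vr (fun r => r.1)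
  have hperm := PySem.List.sorted_perm vr (fun r => r.1) false
  obtain ⟨hm1, hm2⟩ := pvMerge_inv _ hsorted
  simp only [List.all_eq_true]
  constructor <;> intro h c hc
  · have := (pvCovered_iff _ c hm1 hm2).mp (h c hc)
    rw [pvMerge_cov c _ hsorted] at this
    obtain ⟨p, hp, h1, h2⟩ := this
    exact ⟨p, hperm.mem_iff.mp hp, h1, h2⟩
  · rw [pvCovered_iff _ c hm1 hm2, pvMerge_cov c _ hsorted]
    obtain ⟨p, hp, h1, h2⟩ := h c hc
    exact ⟨p, hperm.mem_iff.mpr hp, h1, h2⟩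

-- ===== VERDICT (by name: the statement is the Claim_ definition above) =====
theorem all_valid_spec : Claim_equal_all_valid := by
  intro column vr _
  unfold Spec_all_valid
  have h1 := all_valid_iff column vr
  have h2 := all_valid_alt_iff column vr
  rw [Bool.eq_iff_iff, h1, h2]
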